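-- pv_equiv track=rewrite | github.com/pypi-data/pypi-mirror-351 | packages/simple-blast/simple_blast-0.4.0.tar.gz/simple_blast-0.4.0/src/tests/simple_blast_test.py | parse_blast_command
-- ===== SOURCE A (Python) =====
-- def parse_blast_command(args):
--     positional = []
--     named = {}
--     key = None
--     for x in args:
--         flag = x.startswith("-")
--         if flag:
--             if key is not None:
--                 named[key] = None
--             key = x[1:]
--         elif key is not None:
--             named[key] = x
--             key = None
--         else:
--             positional.append(x)
--     if key is not None:
--         named[key] = None
--     return (positional, named)
-- ===== SOURCE B (Python) =====
-- def parse_blast_command(args):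
--     positional = []
--     named = {}
--     i = 0
--     n = len(args)
--     while i < n:
--         x = args[i]
--         if x.startswith("-"):
--             key = x[1:]
--             if i + 1 < n and not args[i + 1].startswith("-"):
--                 named[key] = args[i + 1]
--                 i += 2
--             else:
--                 named[key] = None
--                 i += 1
--         else:
--             positional.append(x)
--             i += 1
--     return (positional, named)
-- ===== Notes on version B (the rewrite author's own statement) =====
-- stated objective: alternative
-- what changed: Replaces A's carried pending-key state variable and trailing flush with an index-free one-step-lookahead scan that consumes each flag together with its value (or None) in one step.
import Mathlib
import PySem

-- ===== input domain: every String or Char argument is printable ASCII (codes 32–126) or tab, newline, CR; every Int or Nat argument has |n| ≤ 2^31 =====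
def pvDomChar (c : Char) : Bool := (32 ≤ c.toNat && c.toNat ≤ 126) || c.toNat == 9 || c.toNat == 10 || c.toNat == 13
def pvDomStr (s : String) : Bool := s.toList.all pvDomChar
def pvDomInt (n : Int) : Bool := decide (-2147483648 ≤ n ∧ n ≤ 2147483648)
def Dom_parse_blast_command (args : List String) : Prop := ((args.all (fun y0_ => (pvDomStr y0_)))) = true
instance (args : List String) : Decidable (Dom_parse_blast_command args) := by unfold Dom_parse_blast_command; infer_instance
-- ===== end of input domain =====

-- B replaces A's carried pending-key state and trailing flush with an index-free one-step-lookahead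
-- scan that consumes flag/value pairs directly (objective: alternative decomposition, same cost).

-- ===== PORT A =====
-- one loop iteration of A: state is (positional, named, key)
def pvStepA (st : List String × PySem.Dict String (Option String) × Option String)
    (x : String) : List String × PySem.Dict String (Option String) × Option String :=
  let flag := PySem.Str.startswith x "-"
  if flag then
    let named := match st.2.2 with
      | some k => st.2.1.insert k none
      | none => st.2.1
    (st.1, named, some (PySem.Str.slice x (some 1) none))
  else
    match st.2.2 with
    | some k => (st.1, st.2.1.insert k (some x), none)
    | none => (st.1 ++ [x], st.2.1, st.2.2)

-- A's trailing 'if key is not None: named[key] = None' and return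
def pvFlushA (st : List String × PySem.Dict String (Option String) × Option String) :
    List String × (List (String × Option String)) :=
  match st.2.2 with
  | some k => (st.1, (st.2.1.insert k none).items)
  | none => (st.1, st.2.1.items)

def parse_blast_command (args : List String) : List String × (List (String × Option String)) :=
  pvFlushA (args.foldl pvStepA ([], PySem.Dict.empty, none))

-- ===== PORT B =====
-- B's while loop with one-step lookahead, as recursion on the remaining args
def pvGoB : List String → List String → PySem.Dict String (Option String) →
    List String × (List (String × Option String))
  | [], positional, named => (positional, named.items)
  | x :: rest, positional, named =>
    if PySem.Str.startswith x "-" then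
      let key := PySem.Str.slice x (some 1) none
      match rest with
      | [] => (positional, (named.insert key none).items)
      | y :: rest' =>
        if PySem.Str.startswith y "-" then
          pvGoB (y :: rest') positional (named.insert key none)
        else
          pvGoB rest' positional (named.insert key (some y))
    else
      pvGoB rest (positional ++ [x]) named

def parse_blast_command_alt (args : List String) : List String × (List (String × Option String)) :=
  pvGoB args [] PySem.Dict.empty

-- ===== PRECONDITION & SPEC =====
def Spec_parse_blast_command (args : List String) (out : List String × (List (String × Option String))) : Prop := out = parse_blast_command_alt args
instance (args : List String) (out : List String × (List (String × Option String))) : Decidable (Spec_parse_blast_command args out) := by unfold Spec_parse_blast_command; infer_instance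

-- ===== CLAIM (what is proved, stated in full; the proofs are below) =====
def Claim_equal_parse_blast_command : Prop := ∀ (args : List String), Dom_parse_blast_command args → Spec_parse_blast_command args (parse_blast_command args)

-- ===== LEMMAS AND PROOFS =====

-- what B does from a pending key k: the flag branch of pvGoB after key is computed
def pvGoK (k : String) : List String → List String → PySem.Dict String (Option String) →
    List String × (List (String × Option String))
  | [], positional, named => (positional, (named.insert k none).items)
  | y :: rest', positional, named =>
    if PySem.Str.startswith y "-" then
      pvGoB (y :: rest') positional (named.insert k none)
    else
      pvGoB rest' positional (named.insert k (some y))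

lemma pvGoB_cons_flag (x : String) (rest positional : List String)
    (named : PySem.Dict String (Option String))
    (h : PySem.Str.startswith x "-" = true) :
    pvGoB (x :: rest) positional named
      = pvGoK (PySem.Str.slice x (some 1) none) rest positional named := by
  cases rest with
  | nil => rw [pvGoB, if_pos h]; rfl
  | cons y rest' => rw [pvGoB, if_pos h]; rfl

lemma pvLoop_eq (args : List String) :
    ∀ (positional : List String) (named : PySem.Dict String (Option String)) (key : Option String),
      pvFlushA (args.foldl pvStepA (positional, named, key))
        = match key with
          | none => pvGoB args positional named
          | some k => pvGoK k args positional named := by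
  induction args with
  | nil =>
    intro positional named key
    cases key with
    | none => simp [pvFlushA, pvGoB]
    | some k => simp [pvFlushA, pvGoK]
  | cons x rest ih =>
    intro positional named key
    rw [List.foldl_cons]
    by_cases hx : PySem.Str.startswith x "-" = true
    · cases key with
      | none =>
        rw [pvGoB_cons_flag x rest positional named hx]
        simpa [pvStepA, hx, -PySem.Str.startswith_eq] using ih positional named (some (PySem.Str.slice x (some 1) none))
      | some k =>
        show _ = pvGoK k (x :: rest) positional named
        rw [pvGoK, if_pos hx, pvGoB_cons_flag x rest positional (named.insert k none) hx]
        simpa [pvStepA, hx, -PySem.Str.startswith_eq] using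
          ih positional (named.insert k none) (some (PySem.Str.slice x (some 1) none))
    · cases key with
      | none =>
        show _ = pvGoB (x :: rest) positional named
        rw [pvGoB, if_neg hx]
        simpa [pvStepA, hx, -PySem.Str.startswith_eq] using ih (positional ++ [x]) named none
      | some k =>
        show _ = pvGoK k (x :: rest) positional named
        rw [pvGoK, if_neg hx]
        simpa [pvStepA, hx, -PySem.Str.startswith_eq] using ih positional (named.insert k (some x)) none

-- ===== VERDICT (by name: the statement is the Claim_ definition above) =====
theorem parse_blast_command_spec : Claim_equal_parse_blast_command := by
  intro args _
  show parse_blast_command args = parse_blast_command_alt args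
  rw [parse_blast_command, parse_blast_command_alt]
  exact pvLoop_eq args [] PySem.Dict.empty none
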